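-- pv_equiv track=rewrite | github.com/Arielliv/foobar | bringing_a_gun_to_a_gourd_fight_4_3/solution.py | get_all_reflected_points
-- ===== SOURCE A (Python) =====
-- def get_all_reflected_points(point, room_dimensions, max_distance):
--     mirrored_points = []
--     for i in range(len(point)):
--         mirrored_coordinates = []
--         for j in range(-(max_distance // room_dimensions[i]) - 1, (max_distance // room_dimensions[i] + 2)):
--             mirrored_coordinates.append(get_reflected_coordinate(j, point[i], room_dimensions[i]))
--         mirrored_points.append(mirrored_coordinates)
--     return mirrored_points
--
-- def get_reflected_coordinate(mirror, coordinate, dimension_size):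
--     result = coordinate
--     mirror_rotation = [2 * coordinate, 2 * (dimension_size - coordinate)]
--
--     if mirror < 0:
--         for i in range(mirror, 0):
--             result -= mirror_rotation[(i + 1) % 2]
--     else:
--         for i in range(mirror, 0, -1):
--             result += mirror_rotation[i % 2]
--
--     return result
-- ===== SOURCE B (Python) =====
-- def get_all_reflected_points(point, room_dimensions, max_distance):
--     res = []
--     for c, d in zip(point, room_dimensions):
--         q = max_distance // d
--         res.append([m * d + (c if m % 2 == 0 else d - c) for m in range(-q - 1, q + 2)])
--     return res
-- ===== Notes on version B (the rewrite author's own statement) =====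
-- stated objective: faster
-- what changed: Each reflected coordinate is computed by the closed form m*d + (c if m even else d-c) instead of A's inner loop that accumulates |m| mirror rotations per mirror index.
import Mathlib
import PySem

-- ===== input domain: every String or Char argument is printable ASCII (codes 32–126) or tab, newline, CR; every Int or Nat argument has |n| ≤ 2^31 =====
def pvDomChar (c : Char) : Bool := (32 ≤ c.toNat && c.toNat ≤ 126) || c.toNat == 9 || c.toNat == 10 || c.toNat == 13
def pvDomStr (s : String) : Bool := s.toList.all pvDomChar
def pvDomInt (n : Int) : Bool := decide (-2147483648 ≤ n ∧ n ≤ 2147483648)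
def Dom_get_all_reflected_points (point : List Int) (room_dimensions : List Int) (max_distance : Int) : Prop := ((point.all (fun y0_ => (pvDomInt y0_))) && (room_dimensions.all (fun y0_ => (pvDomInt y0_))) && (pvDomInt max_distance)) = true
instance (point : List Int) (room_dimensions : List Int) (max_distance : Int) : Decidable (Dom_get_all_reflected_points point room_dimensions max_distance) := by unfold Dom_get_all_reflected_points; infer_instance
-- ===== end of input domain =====

-- B replaces A's inner accumulation loop (many additions per mirror index) by the closed form
-- m*d + (c if m even else d-c) and zips point with room_dimensions; objective: faster.


-- ===== PORT A =====
def get_reflected_coordinate (mirror : Int) (coordinate : Int) (dimension_size : Int) : Int :=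
  let mirror_rotation : List Int := [2 * coordinate, 2 * (dimension_size - coordinate)]
  if mirror < 0 then
    (PySem.List.pyRange mirror 0 1).foldl
      (fun result i => result - PySem.List.pyGetD mirror_rotation (PySem.Int.mod (i + 1) 2) 0) coordinate
  else
    (PySem.List.pyRange mirror 0 (-1)).foldl
      (fun result i => result + PySem.List.pyGetD mirror_rotation (PySem.Int.mod i 2) 0) coordinate

def get_all_reflected_points (point : List Int) (room_dimensions : List Int) (max_distance : Int) : List (List Int) :=
  (PySem.List.pyRange 0 point.length 1).foldl (fun mirrored_points i =>
    let di := PySem.List.pyGetD room_dimensions i 0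
    let q := PySem.Int.floordiv max_distance di
    let mirrored_coordinates :=
      (PySem.List.pyRange (-q - 1) (q + 2) 1).foldl
        (fun mc j => mc ++ [get_reflected_coordinate j (PySem.List.pyGetD point i 0) di]) []
    mirrored_points ++ [mirrored_coordinates]) []

-- ===== PORT B =====
def get_all_reflected_points_alt (point : List Int) (room_dimensions : List Int) (max_distance : Int) : List (List Int) :=
  (point.zip room_dimensions).foldl (fun res cd =>
    let q := PySem.Int.floordiv max_distance cd.2
    res ++ [(PySem.List.pyRange (-q - 1) (q + 2) 1).map
      (fun m => m * cd.2 + (if PySem.Int.mod m 2 = 0 then cd.1 else cd.2 - cd.1))]) []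

-- ===== PRECONDITION & SPEC =====
-- Pre_ excludes exactly the inputs on which the Python A raises: point longer than
-- room_dimensions (IndexError) and a used room dimension equal to 0 (ZeroDivisionError).
def Pre_get_all_reflected_points (point : List Int) (room_dimensions : List Int) (max_distance : Int) : Prop :=
  point.length ≤ room_dimensions.length ∧ ∀ d ∈ room_dimensions.take point.length, d ≠ 0
instance (point : List Int) (room_dimensions : List Int) (max_distance : Int) : Decidable (Pre_get_all_reflected_points point room_dimensions max_distance) := by unfold Pre_get_all_reflected_points; infer_instance

def pvWitness_get_all_reflected_points : List Int × List Int × Int := ([2, 1], [4, 3], 10)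

def Spec_get_all_reflected_points (point : List Int) (room_dimensions : List Int) (max_distance : Int) (out : List (List Int)) : Prop := out = get_all_reflected_points_alt point room_dimensions max_distance
instance (point : List Int) (room_dimensions : List Int) (max_distance : Int) (out : List (List Int)) : Decidable (Spec_get_all_reflected_points point room_dimensions max_distance out) := by unfold Spec_get_all_reflected_points; infer_instance

-- ===== CLAIM (what is proved, stated in full; the proofs are below) =====
def Claim_equal_get_all_reflected_points : Prop := ∀ (point : List Int) (room_dimensions : List Int) (max_distance : Int), Dom_get_all_reflected_points point room_dimensions max_distance → Pre_get_all_reflected_points point room_dimensions max_distance → Spec_get_all_reflected_points point room_dimensions max_distance (get_all_reflected_points point room_dimensions max_distance)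
-- ===== LEMMAS AND PROOFS =====

-- A's rotation-table lookup, resolved by the parity of the index
theorem pvRot_lookup (c d i : Int) :
    PySem.List.pyGetD [2 * c, 2 * (d - c)] (PySem.Int.mod i 2) 0 =
      (if i % 2 = 0 then 2 * c else 2 * (d - c)) := by
  rw [PySem.Int.mod_eq_emod_of_pos (a := i) (b := 2) (by norm_num)]
  rcases Int.emod_two_eq i with h | h <;> rw [h] <;>
    simp [PySem.List.pyGetD, PySem.List.pyGet?, PySem.List.pyIdx?]

-- A's negative-mirror loop, summed
theorem pv_negsum (n : Nat) (c d : Int) :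
    ((PySem.List.pyRange (-(n : Int) - 1) 0 1).map
      (fun i => PySem.List.pyGetD [2 * c, 2 * (d - c)] (PySem.Int.mod (i + 1) 2) 0)).sum =
    c - (-(n : Int) - 1) * d - (if (-(n : Int) - 1) % 2 = 0 then c else d - c) := by
  induction n with
  | zero =>
    rw [PySem.List.pyRange_one_cons (by norm_num)]
    norm_num [pvRot_lookup]
    omega
  | succ k ih =>
    rw [show (-(↑(k+1) : Int) - 1) = (-(k:Int) - 1) - 1 by push_cast; ring,
        PySem.List.pyRange_one_cons (by omega), List.map_cons, List.sum_cons,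
        show (-(k:Int) - 1 - 1 + 1) = -(k:Int) - 1 by ring, ih, pvRot_lookup,
        show ((-(k:Int) - 1 - 1)) * d = (-(k:Int) - 1) * d - d by ring]
    split_ifs <;> omega

-- peeling the head of a step -1 range (no library lemma covers a negative step)
theorem pv_range_negone_cons (m : Int) (h : 0 < m) :
    PySem.List.pyRange m 0 (-1) = m :: PySem.List.pyRange (m - 1) 0 (-1) := by
  have e : ∀ x : Int, (x - 0 + - -1 - 1) / - -1 = x := by intro x; norm_num
  simp only [PySem.List.pyRange,
    if_neg (show ¬((-1:Int) = 0) by norm_num),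
    if_neg (show ¬((0:Int) < -1) by norm_num),
    if_pos h, e]
  by_cases h1 : (0:Int) < m - 1
  · rw [if_pos h1,
        show m.toNat = (m-1).toNat + 1 by omega, List.range_succ_eq_map]
    simp only [List.map_cons, List.map_map, Nat.cast_zero]
    congr 1
    · push_cast; ring
    · exact List.map_congr_left (fun k _ => by simp [Function.comp]; ring)
  · rw [if_neg h1, show m.toNat = 1 by omega]
    simp

-- A's positive-mirror loop, summed
theorem pv_possum (n : Nat) (c d : Int) :
    ((PySem.List.pyRange (n : Int) 0 (-1)).map
      (fun i => PySem.List.pyGetD [2 * c, 2 * (d - c)] (PySem.Int.mod i 2) 0)).sum =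
    (n : Int) * d + (if (n : Int) % 2 = 0 then c else d - c) - c := by
  induction n with
  | zero => simp [PySem.List.pyRange]
  | succ k ih =>
    rw [pv_range_negone_cons _ (by positivity), List.map_cons, List.sum_cons,
        show ((k + 1 : Nat) : Int) - 1 = (k : Int) by push_cast; ring, ih, pvRot_lookup,
        show ((k + 1 : Nat) : Int) * d = (k : Int) * d + d by push_cast; ring]
    split_ifs <;> omega

-- closed form of A's helper = B's per-mirror formula
theorem refl_closed (m c d : Int) :
    get_reflected_coordinate m c d = m * d + (if PySem.Int.mod m 2 = 0 then c else d - c) := by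
  rw [show PySem.Int.mod m 2 = m % 2 from PySem.Int.mod_eq_emod_of_pos (by norm_num)]
  unfold get_reflected_coordinate
  by_cases hm : m < 0
  · rw [if_pos hm,
        show (fun (result : Int) i => result - PySem.List.pyGetD [2*c, 2*(d-c)] (PySem.Int.mod (i+1) 2) 0)
           = (fun (result : Int) i => result + (-(PySem.List.pyGetD [2*c, 2*(d-c)] (PySem.Int.mod (i+1) 2) 0))) from by funext r i; ring,
        PySem.List.foldl_add]
    have hn : m = -(((-m-1).toNat : Nat) : Int) - 1 := by omega
    rw [hn, show (fun i => -(PySem.List.pyGetD [2*c, 2*(d-c)] (PySem.Int.mod (i+1) 2) 0))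
           = (Neg.neg ∘ fun i => PySem.List.pyGetD [2*c, 2*(d-c)] (PySem.Int.mod (i+1) 2) 0) from rfl,
        ← List.map_map, ← List.sum_neg, pv_negsum]
    split_ifs <;> ring
  · rw [if_neg hm]
    have hn : m = ((m.toNat : Nat) : Int) := by omega
    rw [hn, PySem.List.foldl_add, pv_possum]
    split_ifs <;> ring

-- indexing by range = walking the zip, when point is no longer than room_dimensions
theorem pv_zip_index {α : Type} (f : Int → Int → α) : ∀ (ps ds : List Int), ps.length ≤ ds.length →
    (List.range ps.length).map (fun k => f (ps.getD k 0) (ds.getD k 0)) =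
      (ps.zip ds).map (fun cd => f cd.1 cd.2) := by
  intro ps
  induction ps with
  | nil => intro ds _; simp
  | cons p pt ih =>
    intro ds hlen
    cases ds with
    | nil => simp at hlen
    | cons r rt =>
      simp only [List.length_cons, List.range_succ_eq_map, List.map_cons, List.map_map,
        List.zip_cons_cons]
      refine congrArg₂ _ rfl ?_
      rw [← ih rt (by simpa using hlen)]
      exact List.map_congr_left (fun k _ => by simp [Function.comp, Nat.succ_eq_add_one])

theorem pv_outer (point room_dimensions : List Int) (max_distance : Int)
    (h : point.length ≤ room_dimensions.length) :
    get_all_reflected_points point room_dimensions max_distance =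
      get_all_reflected_points_alt point room_dimensions max_distance := by
  show (PySem.List.pyRange 0 point.length 1).foldl (fun mirrored_points i =>
      mirrored_points ++ [(PySem.List.pyRange (-(PySem.Int.floordiv max_distance (PySem.List.pyGetD room_dimensions i 0)) - 1)
          (PySem.Int.floordiv max_distance (PySem.List.pyGetD room_dimensions i 0) + 2) 1).foldl
        (fun mc j => mc ++ [get_reflected_coordinate j (PySem.List.pyGetD point i 0) (PySem.List.pyGetD room_dimensions i 0)]) []]) []
    = (point.zip room_dimensions).foldl (fun res cd =>
      res ++ [(PySem.List.pyRange (-(PySem.Int.floordiv max_distance cd.2) - 1) (PySem.Int.floordiv max_distance cd.2 + 2) 1).map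
        (fun m => m * cd.2 + (if PySem.Int.mod m 2 = 0 then cd.1 else cd.2 - cd.1))]) []
  rw [PySem.List.foldl_append_singleton_eq_map, PySem.List.foldl_append_singleton_eq_map,
      PySem.List.pyRange_zero_natCast, List.map_map, List.nil_append, List.nil_append,
      ← pv_zip_index (fun c d =>
        (PySem.List.pyRange (-(PySem.Int.floordiv max_distance d) - 1) (PySem.Int.floordiv max_distance d + 2) 1).map
          (fun m => m * d + (if PySem.Int.mod m 2 = 0 then c else d - c))) point room_dimensions h]
  refine List.map_congr_left (fun k _ => ?_)
  simp only [Function.comp, PySem.List.pyGetD_natCast, PySem.List.foldl_append_singleton_eq_map,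
    List.nil_append]
  exact List.map_congr_left (fun j _ => refl_closed j _ _)

-- ===== VERDICT (by name: the statement is the Claim_ definition above) =====
theorem get_all_reflected_points_spec : Claim_equal_get_all_reflected_points := by
  intro point rd md _ hpre
  exact pv_outer point rd md hpre.1
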